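-- pv_equiv track=rewrite | github.com/jyesselm/twoway-lib-generation | src/twoway_lib/validation.py | count_structure_differences
-- ===== SOURCE A (Python) =====
-- def count_structure_differences(designed: str, predicted: str) -> dict[str, int]:
--     """
--     Count different types of structure mismatches.
--
--     Args:
--         designed: Designed secondary structure.
--         predicted: Predicted secondary structure.
--
--     Returns:
--         Dictionary with counts of different mismatch types.
--     """
--     if len(designed) != len(predicted):
--         return {"length_mismatch": abs(len(designed) - len(predicted))}
--
--     counts = {
--         "total_mismatches": 0,
--         "unpaired_to_paired": 0,
--         "paired_to_unpaired": 0,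
--         "bracket_swap": 0,
--     }
--
--     for d, p in zip(designed, predicted, strict=True):
--         if d == p:
--             continue
--         counts["total_mismatches"] += 1
--         if d == "." and p in "()":
--             counts["unpaired_to_paired"] += 1
--         elif d in "()" and p == ".":
--             counts["paired_to_unpaired"] += 1
--         elif d in "()" and p in "()":
--             counts["bracket_swap"] += 1
--
--     return counts
-- ===== SOURCE B (Python) =====
-- def count_structure_differences(designed: str, predicted: str) -> dict[str, int]:
--     if len(designed) != len(predicted):
--         return {"length_mismatch": abs(len(designed) - len(predicted))}
--     pairs = list(zip(designed, predicted, strict=True))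
--     return {
--         "total_mismatches": sum(1 for d, p in pairs if d != p),
--         "unpaired_to_paired": sum(1 for d, p in pairs if d == "." and p in "()"),
--         "paired_to_unpaired": sum(1 for d, p in pairs if d in "()" and p == "."),
--         "bracket_swap": sum(1 for d, p in pairs if d in "()" and p in "()" and d != p),
--     }
-- ===== Notes on version B (the rewrite author's own statement) =====
-- stated objective: simpler
-- what changed: Replaces the single branching loop that mutates a counter dict with four independent generator-expression passes over the zipped pair list, each computing one count directly; the dict is assembled once at the end.
import Mathlib
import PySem

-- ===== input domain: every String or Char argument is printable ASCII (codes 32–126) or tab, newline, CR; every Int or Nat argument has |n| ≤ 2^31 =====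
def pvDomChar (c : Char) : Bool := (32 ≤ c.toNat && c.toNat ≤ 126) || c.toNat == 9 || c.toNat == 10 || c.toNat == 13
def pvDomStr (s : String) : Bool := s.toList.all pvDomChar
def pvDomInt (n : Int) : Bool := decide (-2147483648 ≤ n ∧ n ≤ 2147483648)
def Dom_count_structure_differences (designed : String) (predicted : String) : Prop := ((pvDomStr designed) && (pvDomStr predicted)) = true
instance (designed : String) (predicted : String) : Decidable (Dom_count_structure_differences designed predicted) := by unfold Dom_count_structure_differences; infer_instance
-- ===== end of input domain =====

-- B replaces A's single branching loop over a mutable counter dict with four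
-- independent counting passes over the zipped pairs (objective: simpler).

-- ===== PORT A =====
-- A's loop body: skip if d==p, else bump counters in the dict.
def csdLoopStep (counts : PySem.Dict String Int) (dp : Char × Char) : PySem.Dict String Int :=
  if dp.1 = dp.2 then counts
  else
    let counts := counts.modify "total_mismatches" 0 (· + 1)
    if dp.1 = '.' ∧ (dp.2 = '(' ∨ dp.2 = ')') then
      counts.modify "unpaired_to_paired" 0 (· + 1)
    else if (dp.1 = '(' ∨ dp.1 = ')') ∧ dp.2 = '.' then
      counts.modify "paired_to_unpaired" 0 (· + 1)
    else if (dp.1 = '(' ∨ dp.1 = ')') ∧ (dp.2 = '(' ∨ dp.2 = ')') then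
      counts.modify "bracket_swap" 0 (· + 1)
    else counts

def count_structure_differences (designed : String) (predicted : String) : List (String × Int) :=
  if designed.toList.length ≠ predicted.toList.length then
    [("length_mismatch", (((designed.toList.length : Int) - (predicted.toList.length : Int)).natAbs : Int))]
  else
    let counts : PySem.Dict String Int :=
      PySem.Dict.mk [("total_mismatches", 0), ("unpaired_to_paired", 0),
       ("paired_to_unpaired", 0), ("bracket_swap", 0)]
    ((designed.toList.zip predicted.toList).foldl csdLoopStep counts).items

-- ===== PORT B =====
def count_structure_differences_alt (designed : String) (predicted : String) : List (String × Int) :=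
  if designed.toList.length ≠ predicted.toList.length then
    [("length_mismatch", (((designed.toList.length : Int) - (predicted.toList.length : Int)).natAbs : Int))]
  else
    let pairs := designed.toList.zip predicted.toList
    [("total_mismatches", ((pairs.countP (fun dp => dp.1 != dp.2)) : Int)),
     ("unpaired_to_paired", ((pairs.countP (fun dp => dp.1 == '.' && (dp.2 == '(' || dp.2 == ')'))) : Int)),
     ("paired_to_unpaired", ((pairs.countP (fun dp => (dp.1 == '(' || dp.1 == ')') && dp.2 == '.')) : Int)),
     ("bracket_swap", ((pairs.countP (fun dp => (dp.1 == '(' || dp.1 == ')') && (dp.2 == '(' || dp.2 == ')') && dp.1 != dp.2)) : Int))]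

-- ===== PRECONDITION & SPEC =====
def Spec_count_structure_differences (designed : String) (predicted : String) (out : List (String × Int)) : Prop := out = count_structure_differences_alt designed predicted
instance (designed : String) (predicted : String) (out : List (String × Int)) : Decidable (Spec_count_structure_differences designed predicted out) := by unfold Spec_count_structure_differences; infer_instance

-- ===== CLAIM (what is proved, stated in full; the proofs are below) =====
def Claim_equal_count_structure_differences : Prop := ∀ (designed : String) (predicted : String), Dom_count_structure_differences designed predicted → Spec_count_structure_differences designed predicted (count_structure_differences designed predicted)

-- ===== LEMMAS AND PROOFS =====

-- Abbreviation for A's counter-dict state (proof-only helper).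
def dmk (a b c e : Int) : PySem.Dict String Int :=
  PySem.Dict.mk [("total_mismatches", a), ("unpaired_to_paired", b),
    ("paired_to_unpaired", c), ("bracket_swap", e)]

theorem dmk_mod_t (a b c e : Int) :
    (dmk a b c e).modify "total_mismatches" 0 (· + 1) = dmk (a+1) b c e := by
  simp [dmk, PySem.Dict.modify, PySem.Dict.insert, PySem.Dict.getD, PySem.Dict.get?, PySem.Dict.contains]

theorem dmk_mod_u (a b c e : Int) :
    (dmk a b c e).modify "unpaired_to_paired" 0 (· + 1) = dmk a (b+1) c e := by
  simp [dmk, PySem.Dict.modify, PySem.Dict.insert, PySem.Dict.getD, PySem.Dict.get?, PySem.Dict.contains]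

theorem dmk_mod_p (a b c e : Int) :
    (dmk a b c e).modify "paired_to_unpaired" 0 (· + 1) = dmk a b (c+1) e := by
  simp [dmk, PySem.Dict.modify, PySem.Dict.insert, PySem.Dict.getD, PySem.Dict.get?, PySem.Dict.contains]

theorem dmk_mod_b (a b c e : Int) :
    (dmk a b c e).modify "bracket_swap" 0 (· + 1) = dmk a b c (e+1) := by
  simp [dmk, PySem.Dict.modify, PySem.Dict.insert, PySem.Dict.getD, PySem.Dict.get?, PySem.Dict.contains]

-- Closer used in every branch of the invariant proof: reduce the dict equality
-- to four Int equalities and discharge them with push_cast/omega.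
theorem dmk_eq (a b c e a2 b2 c2 e2 : Int) (h1 : a = a2) (h2 : b = b2) (h3 : c = c2) (h4 : e = e2) :
    dmk a b c e = dmk a2 b2 c2 e2 := by subst h1 h2 h3 h4; rfl

-- Loop invariant: folding A's step over any pair list starting from the 4-key
-- counter dict adds exactly B's four counts to the stored values.
theorem csd_fold_invariant (l : List (Char × Char)) (a b c e : Int) :
    l.foldl csdLoopStep (dmk a b c e) =
    dmk (a + (l.countP (fun dp => dp.1 != dp.2) : Int))
        (b + (l.countP (fun dp => dp.1 == '.' && (dp.2 == '(' || dp.2 == ')')) : Int))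
        (c + (l.countP (fun dp => (dp.1 == '(' || dp.1 == ')') && dp.2 == '.') : Int))
        (e + (l.countP (fun dp => (dp.1 == '(' || dp.1 == ')') && (dp.2 == '(' || dp.2 == ')') && dp.1 != dp.2) : Int)) := by
  induction l generalizing a b c e with
  | nil => simp
  | cons hd tl ih =>
    obtain ⟨d, p⟩ := hd
    rw [List.foldl_cons]
    by_cases hdp : d = p
    · have hstep : csdLoopStep (dmk a b c e) (d, p) = dmk a b c e := by
        simp [csdLoopStep, hdp]
      rw [hstep, ih]
      subst hdp
      have h2 : (d == '.' && (d == '(' || d == ')')) = false := by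
        by_cases h : d = '.' <;> simp [h]
      have h3 : ((d == '(' || d == ')') && d == '.') = false := by
        by_cases h : d = '.' <;> simp [h]
      simp only [List.countP_cons, h2, h3]
      apply dmk_eq <;> simp
    · by_cases hd1 : d = '.' ∧ (p = '(' ∨ p = ')')
      · obtain ⟨rfl, hp⟩ := hd1
        have hstep : csdLoopStep (dmk a b c e) ('.', p) = dmk (a+1) (b+1) c e := by
          rcases hp with rfl | rfl <;>
            (simp only [csdLoopStep]; norm_num; rw [dmk_mod_t, dmk_mod_u]; simp)
        rw [hstep, ih]
        simp only [List.countP_cons]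
        apply dmk_eq <;> rcases hp with rfl | rfl <;> simp <;> push_cast <;> ring
      · by_cases hd2 : (d = '(' ∨ d = ')') ∧ p = '.'
        · obtain ⟨hdd, rfl⟩ := hd2
          have hstep : csdLoopStep (dmk a b c e) (d, '.') = dmk (a+1) b (c+1) e := by
            rcases hdd with rfl | rfl <;>
              (simp only [csdLoopStep]; norm_num; rw [dmk_mod_t, dmk_mod_p]; simp)
          rw [hstep, ih]
          simp only [List.countP_cons]
          apply dmk_eq <;> rcases hdd with rfl | rfl <;> simp <;> push_cast <;> ring
        · by_cases hd3 : (d = '(' ∨ d = ')') ∧ (p = '(' ∨ p = ')')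
          · obtain ⟨hdd, hpp⟩ := hd3
            have hne : (d == p) = false := by simp [hdp]
            have hstep : csdLoopStep (dmk a b c e) (d, p) = dmk (a+1) b c (e+1) := by
              rcases hdd with rfl | rfl <;> rcases hpp with rfl | rfl <;>
                first
                | exact absurd rfl hdp
                | (simp only [csdLoopStep]; norm_num; rw [dmk_mod_t, dmk_mod_b]; simp)
            rw [hstep, ih]
            simp only [List.countP_cons]
            apply dmk_eq <;> rcases hdd with rfl | rfl <;> rcases hpp with rfl | rfl <;>
              simp_all <;> push_cast <;> ring
          · have hstep : csdLoopStep (dmk a b c e) (d, p) = dmk (a+1) b c e := by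
              simp only [csdLoopStep, if_neg hdp, if_neg hd1, if_neg hd2, if_neg hd3]
              rw [dmk_mod_t]
            rw [hstep, ih]
            simp only [List.countP_cons]
            have h1 : (d != p) = true := by simp [hdp]
            have h2 : (d == '.' && (p == '(' || p == ')')) = false := by
              by_cases ha : d = '.' <;> by_cases hb : p = '(' <;> by_cases hc : p = ')'
                <;> simp_all
            have h3 : ((d == '(' || d == ')') && p == '.') = false := by
              by_cases ha : d = '(' <;> by_cases hb : d = ')' <;> by_cases hc : p = '.'
                <;> simp_all
            have h4 : ((d == '(' || d == ')') && (p == '(' || p == ')')) = false := by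
              by_cases ha : d = '(' <;> by_cases hb : d = ')' <;> by_cases hc : p = '('
                <;> by_cases he : p = ')' <;> simp_all
            simp only [h1, h2, h3, Bool.and_assoc, h4]
            apply dmk_eq <;> simp <;> push_cast <;> omega

-- ===== VERDICT (by name: the statement is the Claim_ definition above) =====
theorem csd_fold_items (l : List (Char × Char)) :
    (l.foldl csdLoopStep (dmk 0 0 0 0)).items =
    [("total_mismatches", (l.countP (fun dp => dp.1 != dp.2) : Int)),
     ("unpaired_to_paired", (l.countP (fun dp => dp.1 == '.' && (dp.2 == '(' || dp.2 == ')')) : Int)),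
     ("paired_to_unpaired", (l.countP (fun dp => (dp.1 == '(' || dp.1 == ')') && dp.2 == '.') : Int)),
     ("bracket_swap", (l.countP (fun dp => (dp.1 == '(' || dp.1 == ')') && (dp.2 == '(' || dp.2 == ')') && dp.1 != dp.2) : Int))] := by
  rw [csd_fold_invariant]
  simp [dmk]

theorem count_structure_differences_spec : Claim_equal_count_structure_differences := by
  intro designed predicted _
  unfold Spec_count_structure_differences count_structure_differences count_structure_differences_alt
  by_cases h : designed.toList.length = predicted.toList.length
  · rw [if_neg (by simp [h]), if_neg (by simp [h])]
    exact csd_fold_items (designed.toList.zip predicted.toList)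
  · rw [if_pos h, if_pos h]
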